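-- pv_equiv track=rewrite | github.com/Neymello/textProcessor | src/textProcessor/core/tokenCore.py | createTokens
-- ===== SOURCE A (Python) =====
-- def createTokens(text):
--     lines = text.split("\n");
--     tokens = []
--
--     for l in lines:
--         for w in l.split(" "):
--             if(w.strip() != ""):
--                 tokens.append(w.strip())
--
--     return tokens
-- ===== SOURCE B (Python) =====
-- def createTokens(text):
--     tokens = []
--     cur = []
--     for ch in text:
--         if ch == " " or ch == "\n":
--             w = "".join(cur).strip()
--             if w != "":
--                 tokens.append(w)
--             cur = []
--         else:
--             cur.append(ch)
--     w = "".join(cur).strip()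
--     if w != "":
--         tokens.append(w)
--     return tokens
-- ===== Notes on version B (the rewrite author's own statement) =====
-- stated objective: alternative
-- what changed: B replaces A's nested split-on-newline / split-on-space loops with a single character-level state machine: one pass over the text accumulating the current piece in a list and flushing it (joined, stripped, kept if non-empty) at each delimiter character and once at the end.
import Mathlib
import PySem

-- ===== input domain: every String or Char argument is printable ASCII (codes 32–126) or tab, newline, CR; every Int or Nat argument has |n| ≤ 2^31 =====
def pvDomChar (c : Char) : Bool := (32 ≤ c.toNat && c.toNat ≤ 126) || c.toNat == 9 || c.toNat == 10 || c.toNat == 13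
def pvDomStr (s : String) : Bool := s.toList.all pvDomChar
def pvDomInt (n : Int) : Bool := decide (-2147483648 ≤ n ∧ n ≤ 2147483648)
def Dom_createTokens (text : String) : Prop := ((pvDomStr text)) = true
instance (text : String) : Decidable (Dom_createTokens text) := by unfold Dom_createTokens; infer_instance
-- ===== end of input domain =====

-- B replaces A's nested split("\n")/split(" ") loops with a single character-level state machine
-- that flushes the stripped current piece at each delimiter (objective: alternative; same asymptotic cost).

-- s.split(sep) for the literal non-empty separators used here (never raises)
def pySplit (s sep : String) : List String :=
  (PySem.Chars.splitOn s.toList sep.toList).map String.ofList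

-- ===== PORT A =====
def createTokens (text : String) : List String :=
  (pySplit text "\n").foldl (fun tokens l =>
    (pySplit l " ").foldl (fun tokens w =>
      if PySem.Str.strip w ≠ "" then tokens ++ [PySem.Str.strip w] else tokens) tokens) []

-- ===== PORT B =====
-- one step of B's loop body: on a delimiter flush the joined-and-stripped current piece, else append to it
def bStep (st : List String × List Char) (ch : Char) : List String × List Char :=
  if ch = ' ' || ch = '\n' then
    let w := PySem.Str.strip (String.ofList st.2)
    (if w ≠ "" then st.1 ++ [w] else st.1, [])
  else (st.1, st.2 ++ [ch])

def createTokens_alt (text : String) : List String :=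
  let st := text.toList.foldl bStep ([], [])
  let w := PySem.Str.strip (String.ofList st.2)
  if w ≠ "" then st.1 ++ [w] else st.1

-- ===== PRECONDITION & SPEC =====
def Spec_createTokens (text : String) (out : List String) : Prop := out = createTokens_alt text
instance (text : String) (out : List String) : Decidable (Spec_createTokens text out) := by unfold Spec_createTokens; infer_instance

-- ===== CLAIM (what is proved, stated in full; the proofs are below) =====
def Claim_equal_createTokens : Prop := ∀ (text : String), Dom_createTokens text → Spec_createTokens text (createTokens text)

-- ===== LEMMAS AND PROOFS =====

-- cons onto the head piece (the head piece always exists for our splits)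
def glue (x : List Char) (ls : List (List Char)) : List (List Char) :=
  match ls with
  | [] => [x]
  | h :: r => (x ++ h) :: r

-- structural form of s.split(<single char c>)
def msp (c : Char) : List Char → List (List Char)
  | [] => [[]]
  | a :: t => if a = c then [] :: msp c t else glue [a] (msp c t)

-- split on either delimiter at once (the partition B's scan produces)
def msp2 : List Char → List (List Char)
  | [] => [[]]
  | a :: t => if a = ' ' || a = '\n' then [] :: msp2 t else glue [a] (msp2 t)

-- strip-filter-stringify a list of pieces (the common canonical pipeline)
def emit (ps : List (List Char)) : List String :=
  (ps.filter (fun w => !(PySem.Chars.strip w).isEmpty)).map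
    (fun w => String.ofList (PySem.Chars.strip w))

theorem glue_ne_nil (x : List Char) (ls : List (List Char)) : glue x ls ≠ [] := by
  cases ls <;> simp [glue]

theorem msp_ne_nil (c : Char) (l : List Char) : msp c l ≠ [] := by
  cases l with
  | nil => simp [msp]
  | cons a t =>
    simp only [msp]
    split
    · simp
    · exact glue_ne_nil _ _

theorem glue_glue (x y : List Char) (m : List (List Char)) :
    glue x (glue y m) = glue (x ++ y) m := by
  cases m <;> simp [glue]

theorem glue_nil (m : List (List Char)) (h : m ≠ []) : glue [] m = m := by
  cases m with
  | nil => exact absurd rfl h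
  | cons a t => simp [glue]

theorem glue_append (x : List Char) (m n : List (List Char)) (h : m ≠ []) :
    glue x (m ++ n) = glue x m ++ n := by
  cases m with
  | nil => exact absurd rfl h
  | cons a t => simp [glue]

theorem splitOn_go_eq (c : Char) :
    ∀ (fuel : Nat) (l cur : List Char) (acc : List (List Char)), l.length ≤ fuel →
      PySem.Chars.splitOn.go [c] fuel l cur acc = acc.reverse ++ glue cur.reverse (msp c l) := by
  intro fuel
  induction fuel with
  | zero =>
    intro l cur acc h
    have hl : l = [] := List.eq_nil_of_length_eq_zero (Nat.le_zero.mp h)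
    subst hl
    simp [PySem.Chars.splitOn.go, msp, glue]
  | succ f ih =>
    intro l cur acc h
    cases l with
    | nil => simp [PySem.Chars.splitOn.go, msp, glue]
    | cons a t =>
      simp only [PySem.Chars.splitOn.go]
      by_cases hac : c = a
      · subst hac
        simp only [List.isPrefixOf, BEq.rfl, Bool.and_self, if_true,
          List.length_cons, List.drop_succ_cons, List.length_nil, List.drop_zero]
        rw [ih t [] (cur.reverse :: acc) (by simpa using h), List.reverse_nil,
          glue_nil _ (msp_ne_nil c t)]
        simp [msp, glue]
      · have : ([c].isPrefixOf (a :: t)) = false := by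
          simp [List.isPrefixOf]
          intro hc; exact absurd hc hac
        rw [this]
        simp only [Bool.false_eq_true, if_false]
        rw [ih t (a :: cur) acc (by simpa using Nat.le_of_succ_le_succ (by simpa using h))]
        simp only [msp, List.reverse_cons]
        rw [if_neg (fun hh => hac hh.symm), glue_glue]

theorem splitOn_eq_msp (c : Char) (l : List Char) :
    PySem.Chars.splitOn l [c] = msp c l := by
  unfold PySem.Chars.splitOn
  rw [splitOn_go_eq c (l.length + 1) l [] [] (Nat.le_succ _)]
  simp [glue_nil _ (msp_ne_nil c l)]

-- B's combined partition = A's two-stage partition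
theorem msp2_eq_flatMap (l : List Char) :
    msp2 l = (msp '\n' l).flatMap (fun x => msp ' ' x) := by
  induction l with
  | nil => simp [msp2, msp]
  | cons a t ih =>
    obtain ⟨h, r, hmr⟩ : ∃ h r, msp '\n' t = h :: r := by
      cases hm : msp '\n' t with
      | nil => exact absurd hm (msp_ne_nil _ _)
      | cons h r => exact ⟨h, r, rfl⟩
    by_cases hn : a = '\n'
    · subst hn
      simp [msp2, msp, ih]
    · by_cases hs : a = ' '
      · subst hs
        simp only [msp2, msp, if_neg hn, decide_true, Bool.true_or, if_true]
        rw [ih, hmr]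
        simp [msp, glue]
      · have hd : (decide (a = ' ') || decide (a = '\n')) = false := by
          simp [hs, hn]
        simp only [msp2, msp, hd, Bool.false_eq_true, if_false, if_neg hn]
        rw [ih, hmr]
        simp only [List.flatMap_cons]
        rw [glue_append _ _ _ (msp_ne_nil ' ' h)]
        obtain ⟨h', r', hmr'⟩ : ∃ h' r', msp ' ' h = h' :: r' := by
          cases hm : msp ' ' h with
          | nil => exact absurd hm (msp_ne_nil _ _)
          | cons h' r' => exact ⟨h', r', rfl⟩
        simp [msp, hmr', if_neg hs, glue]

theorem emit_append (m n : List (List Char)) : emit (m ++ n) = emit m ++ emit n := by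
  simp [emit]

-- finishing B's state: flush the stripped residue
def bFin (st : List String × List Char) : List String :=
  if PySem.Str.strip (String.ofList st.2) ≠ "" then
    st.1 ++ [PySem.Str.strip (String.ofList st.2)] else st.1

theorem msp2_ne_nil (l : List Char) : msp2 l ≠ [] := by
  cases l with
  | nil => simp [msp2]
  | cons a t =>
    simp only [msp2]
    split
    · simp
    · exact glue_ne_nil _ _

theorem bFin_emit (acc : List String) (cur : List Char) :
    bFin (acc, cur) = acc ++ emit [cur] := by
  have hs : PySem.Str.strip (String.ofList cur) = String.ofList (PySem.Chars.strip cur) := by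
    simp [PySem.Str.strip]
  unfold bFin emit
  rw [hs]
  by_cases hc : (PySem.Chars.strip cur).isEmpty
  · rw [if_neg (by simp [List.isEmpty_iff.mp hc])]
    simp [List.filter, hc]
  · rw [if_pos (by simp [String.ofList_eq_empty_iff]; exact fun h => hc (by simp [h]))]
    simp [List.filter, hc]

-- the scan invariant: running B's loop from (acc, cur) emits acc, then the pieces of glue cur (msp2 l)
theorem scan_eq (l : List Char) :
    ∀ (acc : List String) (cur : List Char),
      bFin (l.foldl bStep (acc, cur)) = acc ++ emit (glue cur (msp2 l)) := by
  induction l with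
  | nil =>
    intro acc cur
    simp only [List.foldl_nil, msp2, glue]
    rw [bFin_emit]
    simp [emit]
  | cons a t ih =>
    intro acc cur
    by_cases hd : a = ' ' ∨ a = '\n'
    · have hdb : (decide (a = ' ') || decide (a = '\n')) = true := by
        rcases hd with h | h <;> simp [h]
      simp only [List.foldl_cons, bStep, hdb, if_true]
      have hstep : (if PySem.Str.strip (String.ofList cur) ≠ "" then
          acc ++ [PySem.Str.strip (String.ofList cur)] else acc) =
          bFin (acc, cur) := rfl
      rw [hstep, ih (bFin (acc, cur)) [], bFin_emit]
      rw [glue_nil _ (msp2_ne_nil t)]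
      simp only [msp2, hdb, if_true]
      have hg : glue cur ([] :: msp2 t) = cur :: msp2 t := by simp [glue]
      rw [hg]
      have : emit (cur :: msp2 t) = emit [cur] ++ emit (msp2 t) := by
        simpa using emit_append [cur] (msp2 t)
      rw [this, List.append_assoc]
    · have hdb : (decide (a = ' ') || decide (a = '\n')) = false := by
        simp [not_or] at hd; simp [hd.1, hd.2]
      simp only [List.foldl_cons, bStep, hdb, Bool.false_eq_true, if_false]
      rw [ih acc (cur ++ [a])]
      simp only [msp2, hdb, Bool.false_eq_true, if_false]
      rw [glue_glue]

theorem createTokens_alt_eq_canon (text : String) :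
    createTokens_alt text = emit ((msp '\n' text.toList).flatMap (fun x => msp ' ' x)) := by
  have h : createTokens_alt text = bFin (text.toList.foldl bStep ([], [])) := rfl
  rw [h, scan_eq text.toList [] []]
  rw [glue_nil _ (msp2_ne_nil _), msp2_eq_flatMap]
  simp

-- A's nested folds, reduced to the same canonical pipeline
theorem createTokens_eq_canon (text : String) :
    createTokens text = emit ((msp '\n' text.toList).flatMap (fun x => msp ' ' x)) := by
  unfold createTokens pySplit
  have h1 : ("\n" : String).toList = ['\n'] := rfl
  have h2 : (" " : String).toList = [' '] := rfl
  rw [h1, splitOn_eq_msp, List.foldl_map]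
  have inner : ∀ (line : List Char) (acc : List String),
      ((PySem.Chars.splitOn (String.ofList line).toList (" " : String).toList).map
          String.ofList).foldl (fun tokens w =>
        if PySem.Str.strip w ≠ "" then tokens ++ [PySem.Str.strip w] else tokens) acc =
      acc ++ emit (msp ' ' line) := by
    intro line acc
    rw [String.toList_ofList, h2, splitOn_eq_msp, List.foldl_map]
    unfold emit
    calc (msp ' ' line).foldl (fun tokens w =>
            if PySem.Str.strip (String.ofList w) ≠ "" then
              tokens ++ [PySem.Str.strip (String.ofList w)] else tokens) acc
        = (msp ' ' line).foldl (fun tokens w =>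
            if (!(PySem.Chars.strip w).isEmpty) = true then
              tokens ++ [String.ofList (PySem.Chars.strip w)] else tokens) acc := by
          apply PySem.List.foldl_congr_mem
          intro tokens w _
          have hb : (decide (PySem.Str.strip (String.ofList w) ≠ "")) =
              !(PySem.Chars.strip w).isEmpty := by
            simp [PySem.Str.strip, String.ofList_eq_empty_iff]
            cases h : PySem.Chars.strip w <;> simp
          rw [← hb]
          simp only [decide_eq_true_eq, PySem.Str.strip, String.toList_ofList]
      _ = acc ++ ((msp ' ' line).filter (fun w => !(PySem.Chars.strip w).isEmpty)).map
            (fun w => String.ofList (PySem.Chars.strip w)) := by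
          exact PySem.List.foldl_append_if _ _ _ _
  calc (msp '\n' text.toList).foldl (fun tokens l =>
          ((PySem.Chars.splitOn (String.ofList l).toList (" " : String).toList).map
              String.ofList).foldl (fun tokens w =>
            if PySem.Str.strip w ≠ "" then tokens ++ [PySem.Str.strip w] else tokens) tokens) []
      = (msp '\n' text.toList).foldl (fun tokens l => tokens ++ emit (msp ' ' l)) [] := by
        apply PySem.List.foldl_congr_mem
        intro tokens l _
        exact inner l tokens
    _ = (msp '\n' text.toList).flatMap (fun l => emit (msp ' ' l)) := by
        simpa using PySem.List.foldl_append_eq_flatMap _ _ ([] : List String)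
    _ = _ := by
        induction msp '\n' text.toList with
        | nil => simp [emit]
        | cons h r ihr =>
          simp only [List.flatMap_cons, ihr]
          rw [← emit_append]

-- ===== VERDICT (by name: the statement is the Claim_ definition above) =====
theorem createTokens_spec : Claim_equal_createTokens := by
  intro text _
  unfold Spec_createTokens
  rw [createTokens_eq_canon, createTokens_alt_eq_canon]
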